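-- pv_equiv track=rewrite | github.com/ronitmaheshwari05/ai-internship-agent | src/evaluation/metrics.py | response_count_score
-- ===== SOURCE A (Python) =====
-- def response_count_score(output):
--
--     lines = [line.strip() for line in output.split("\n") if line.strip()]
--
--     count = len(lines)
--
--     if count == 5:
--         return 100
--     if count == 4:
--         return 80
--     if count == 3:
--         return 60
--     if count == 2:
--         return 40
--     if count == 1:
--         return 20
--
--     return 0
-- ===== SOURCE B (Python) =====
-- def response_count_score(output):
--     # Single character-level scan: a state machine counting newline-delimited
--     # segments that contain at least one non-whitespace character.
--     count = 0
--     has_content = False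
--     for ch in output:
--         if ch == '\n':
--             count += has_content
--             has_content = False
--         elif not ch.isspace():
--             has_content = True
--     count += has_content
--     return count * 20 if count <= 5 else 0
-- ===== Notes on version B (the rewrite author's own statement) =====
-- stated objective: alternative
-- what changed: replaces split-on-newline + strip + filter + len and the five-branch cascade with a single character-level state-machine scan (count, has_content) that never builds intermediate line lists, and the closed form count*20 clamped at 5
import Mathlib
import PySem

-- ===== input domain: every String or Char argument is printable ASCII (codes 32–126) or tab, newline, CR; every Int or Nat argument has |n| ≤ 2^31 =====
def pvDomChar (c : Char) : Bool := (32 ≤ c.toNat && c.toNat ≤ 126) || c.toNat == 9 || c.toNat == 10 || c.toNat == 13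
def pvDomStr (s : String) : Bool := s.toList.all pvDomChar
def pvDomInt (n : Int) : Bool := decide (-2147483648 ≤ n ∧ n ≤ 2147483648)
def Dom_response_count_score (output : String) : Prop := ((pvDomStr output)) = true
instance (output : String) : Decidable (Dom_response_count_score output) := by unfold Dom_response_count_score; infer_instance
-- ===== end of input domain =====

-- B replaces split/strip/filter/len plus the five-branch cascade with one character-level
-- state-machine scan and the closed form count*20 clamped at 5 (alternative decomposition).

-- ===== PORT A =====
def response_count_score (output : String) : Int :=
  let lines := (((PySem.Str.split? output "\n").getD []).filter
      (fun line => PySem.Str.strip line != "")).map PySem.Str.strip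
  let count := lines.length
  if count == 5 then 100
  else if count == 4 then 80
  else if count == 3 then 60
  else if count == 2 then 40
  else if count == 1 then 20
  else 0

-- ===== PORT B =====
def response_count_score_alt (output : String) : Int :=
  let st := output.toList.foldl
    (fun (st : Nat × Bool) ch =>
      if ch = '\n' then (st.1 + (if st.2 then 1 else 0), false)
      else if PySem.Chars.isspace ch then st else (st.1, true))
    (0, false)
  let count := st.1 + (if st.2 then 1 else 0)
  if count ≤ 5 then (count : Int) * 20 else 0

-- ===== PRECONDITION & SPEC =====
def Spec_response_count_score (output : String) (out : Int) : Prop := out = response_count_score_alt output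
instance (output : String) (out : Int) : Decidable (Spec_response_count_score output out) := by unfold Spec_response_count_score; infer_instance

-- ===== CLAIM (what is proved, stated in full; the proofs are below) =====
def Claim_equal_response_count_score : Prop := ∀ (output : String), Dom_response_count_score output → Spec_response_count_score output (response_count_score output)

-- ===== LEMMAS AND PROOFS =====

-- structural description of splitting a char list on '\n' (pre = current segment so far)
def splitNL (pre : List Char) : List Char → List (List Char)
  | [] => [pre]
  | c :: rest => if c = '\n' then pre :: splitNL [] rest else splitNL (pre ++ [c]) rest

theorem splitOn_go_eq (l : List Char) : ∀ (fuel : Nat) (acc : List (List Char)) (c0 : List Char),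
    l.length ≤ fuel →
    PySem.Chars.splitOn.go ['\n'] fuel l c0 acc = acc.reverse ++ splitNL c0.reverse l := by
  induction l with
  | nil =>
    intro fuel acc c0 _
    cases fuel <;> simp [PySem.Chars.splitOn.go, splitNL]
  | cons c rest ih =>
    intro fuel acc c0 h
    cases fuel with
    | zero => simp at h
    | succ f =>
      by_cases hc : c = '\n'
      · subst hc
        rw [PySem.Chars.splitOn.go]
        simp only [List.isPrefixOf, List.length_cons] at *
        rw [if_pos (by simp)]
        have hdrop : List.drop (List.length (α := Char) [] + 1) ('\n' :: rest) = rest := rfl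
        rw [hdrop, ih f (c0.reverse :: acc) [] (by omega)]
        simp [splitNL]
      · rw [PySem.Chars.splitOn.go]
        rw [if_neg (by simp [List.isPrefixOf]; exact fun h => hc h.symm)]
        rw [ih f acc (c :: c0) (by simp at h; omega)]
        simp [splitNL, hc]

theorem strip_eq_nil_iff (l : List Char) :
    PySem.Chars.strip l = [] ↔ l.all PySem.Chars.isspace := by
  unfold PySem.Chars.strip PySem.Chars.rstrip PySem.Chars.lstrip
  rw [List.reverse_eq_nil_iff, List.dropWhile_eq_nil_iff]
  simp only [List.mem_reverse, List.all_eq_true]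
  constructor
  · intro hd x hx
    have hsplit := List.takeWhile_append_dropWhile (p := PySem.Chars.isspace) (l := l)
    rw [← hsplit] at hx
    rcases List.mem_append.mp hx with h1 | h2
    · exact List.mem_takeWhile_imp h1
    · exact hd x h2
  · intro hall x hx
    exact hall x (List.dropWhile_sublist _ |>.mem hx)

-- the filter predicate of A, on a raw segment
theorem filtcond (seg : List Char) :
    (PySem.Str.strip (String.ofList seg) != "") = !seg.all PySem.Chars.isspace := by
  have h := strip_eq_nil_iff seg
  have hts : (PySem.Str.strip (String.ofList seg)).toList = PySem.Chars.strip seg := by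
    simp [PySem.Str.strip]
  cases hall : seg.all PySem.Chars.isspace
  · rw [hall] at h
    simp only [Bool.false_eq_true, iff_false] at h
    simp only [Bool.not_false, bne_iff_ne, ne_eq]
    intro he
    exact h (by rw [← hts, he]; rfl)
  · rw [hall] at h
    simp only [iff_true] at h
    have : PySem.Str.strip (String.ofList seg) = "" := by
      rw [← String.toList_eq_nil_iff, hts, h]
    simp [this]

def rcsStep (st : Nat × Bool) (ch : Char) : Nat × Bool :=
  if ch = '\n' then (st.1 + (if st.2 then 1 else 0), false)
  else if PySem.Chars.isspace ch then st else (st.1, true)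

def rcsFin (st : Nat × Bool) : Nat := st.1 + (if st.2 then 1 else 0)

theorem fold_eq (l : List Char) : ∀ (k : Nat) (pre : List Char),
    rcsFin (l.foldl rcsStep (k, !pre.all PySem.Chars.isspace))
    = k + (splitNL pre l).countP (fun s => !s.all PySem.Chars.isspace) := by
  induction l with
  | nil =>
    intro k pre
    simp only [List.foldl_nil, rcsFin, splitNL, List.countP_cons, List.countP_nil]
    cases pre.all PySem.Chars.isspace <;> simp
  | cons c rest ih =>
    intro k pre
    by_cases hc : c = '\n'
    · subst hc
      have hstep : rcsStep (k, !pre.all PySem.Chars.isspace) '\n'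
          = (k + (if !pre.all PySem.Chars.isspace then 1 else 0), false) := by
        simp [rcsStep]
      rw [List.foldl_cons, hstep]
      have h2 := ih (k + (if !pre.all PySem.Chars.isspace then 1 else 0)) []
      simp only [List.all_nil, Bool.not_true] at h2
      rw [h2]
      simp only [splitNL]
      cases h : pre.all PySem.Chars.isspace <;> simp [h] <;> omega
    · by_cases hs : PySem.Chars.isspace c
      · have hstep : rcsStep (k, !pre.all PySem.Chars.isspace) c
            = (k, !(pre ++ [c]).all PySem.Chars.isspace) := by
          simp [rcsStep, hc, hs, List.all_append]
        rw [List.foldl_cons, hstep, ih k (pre ++ [c])]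
        simp [splitNL, hc]
      · have hstep : rcsStep (k, !pre.all PySem.Chars.isspace) c
            = (k, !(pre ++ [c]).all PySem.Chars.isspace) := by
          simp [rcsStep, hc, hs, List.all_append]
        rw [List.foldl_cons, hstep, ih k (pre ++ [c])]
        simp [splitNL, hc]

-- A's if-cascade on the line count is the clamped closed form
theorem rcs_cascade (n : Nat) :
    ((if n == 5 then (100 : Int) else if n == 4 then 80 else if n == 3 then 60
      else if n == 2 then 40 else if n == 1 then 20 else 0)
     = if n ≤ 5 then (n : Int) * 20 else 0) := by
  simp only [beq_iff_eq]
  split_ifs <;> omega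

-- ===== VERDICT (by name: the statement is the Claim_ definition above) =====
theorem response_count_score_spec : Claim_equal_response_count_score := by
  intro output _
  unfold Spec_response_count_score
  have hsplit : PySem.Str.split? output "\n"
      = some ((PySem.Chars.splitOn output.toList ['\n']).map String.ofList) := by
    simp [PySem.Str.split?, PySem.Chars.split?]
  have hOn : PySem.Chars.splitOn output.toList ['\n'] = splitNL [] output.toList := by
    unfold PySem.Chars.splitOn
    simpa using splitOn_go_eq output.toList (output.toList.length + 1) [] [] (by omega)
  set n := (splitNL [] output.toList).countP (fun s => !s.all PySem.Chars.isspace) with hn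
  have hcountA : ((((PySem.Chars.splitOn output.toList ['\n']).map String.ofList).filter
      (fun line => PySem.Str.strip line != "")).map PySem.Str.strip).length = n := by
    rw [List.length_map, ← List.countP_eq_length_filter, List.countP_map, hOn, hn]
    exact List.countP_congr (fun seg _ => by simp [Function.comp, filtcond seg])
  have hB : response_count_score_alt output
      = if rcsFin (output.toList.foldl rcsStep (0, false)) ≤ 5
        then ((rcsFin (output.toList.foldl rcsStep (0, false)) : Int)) * 20 else 0 := rfl
  have hcountB : rcsFin (output.toList.foldl rcsStep (0, false)) = n := by
    have := fold_eq output.toList 0 []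
    simpa [hn] using this
  unfold response_count_score
  rw [hsplit]
  simp only [Option.getD_some, hcountA, hB, hcountB]
  exact rcs_cascade n
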